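-- pv_equiv track=rewrite | github.com/mahmoodm2/MLNotes | interview/python/bit.py | max_min_binary
-- ===== SOURCE A (Python) =====
-- def max_min_binary(num):
--     #prb : 5.3
--     # if num=6 (00000110) -> min=(00000101)5 , max=  (00001001)
--     mask =1
--     ones=0
--     max_len = 16
--     while mask <= num:
--         if (num & mask) > 0:
--             ones +=1
--         mask <<= 1
--     min_bin = ( 1<< ones ) -1
--     max_bin = min_bin << ( max_len - ones )
--
--     return min_bin , max_bin
-- ===== SOURCE B (Python) =====
-- def max_min_binary(num):
--     # Brian Kernighan: clear the lowest set bit once per set bit.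
--     n = num
--     ones = 0
--     while n > 0:
--         n &= n - 1
--         ones += 1
--     min_bin = (1 << ones) - 1
--     max_bin = min_bin << (16 - ones)
--     return min_bin, max_bin
-- ===== Notes on version B (the rewrite author's own statement) =====
-- stated objective: alternative
-- what changed: The per-bit-position mask scan (one iteration per bit position up to the MSB) is replaced by Brian Kernighan's lowest-set-bit clearing loop (one iteration per set bit); the two closed-form lines are kept.
import Mathlib
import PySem

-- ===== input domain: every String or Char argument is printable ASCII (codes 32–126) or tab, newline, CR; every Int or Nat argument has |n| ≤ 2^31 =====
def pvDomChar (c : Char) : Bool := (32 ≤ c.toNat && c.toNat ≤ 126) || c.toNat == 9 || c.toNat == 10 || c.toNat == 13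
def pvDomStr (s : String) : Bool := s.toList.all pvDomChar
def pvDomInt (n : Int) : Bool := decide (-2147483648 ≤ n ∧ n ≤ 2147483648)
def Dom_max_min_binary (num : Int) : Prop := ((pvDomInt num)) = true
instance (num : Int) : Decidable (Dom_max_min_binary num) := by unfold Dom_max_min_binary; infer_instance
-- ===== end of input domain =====

-- B replaces A's per-bit-position mask scan with Brian Kernighan's set-bit clearing loop
-- (one iteration per set bit); the two closed-form output lines are unchanged.

-- ===== PORT A =====
-- A's loop: `while mask <= num: if (num & mask) > 0: ones += 1; mask <<= 1`.
-- `hm` is only a termination invariant (mask starts at 1 and doubles); `mask * 2` is `mask <<= 1`.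
def maxMinLoopA (num mask ones : Int) (hm : 0 < mask) : Int :=
  if mask ≤ num then
    maxMinLoopA num (mask * 2) (if PySem.Int.band num mask > 0 then ones + 1 else ones) (by omega)
  else ones
termination_by (num + 1 - mask).toNat
decreasing_by omega

def max_min_binary (num : Int) : Int × Int :=
  let ones := maxMinLoopA num 1 0 (by norm_num)
  -- `1 << ones`: ones ≥ 0 always, so `.toNat` is exact
  let min_bin := (1 <<< ones.toNat) - 1
  -- `min_bin << (16 - ones)`: exact for ones ≤ 16; Pre_ excludes ones > 16, where Python raises
  let max_bin := min_bin <<< (16 - ones).toNat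
  (min_bin, max_bin)

-- ===== PORT B =====
-- Source B's `while n > 0: n &= n - 1; ones += 1`
def kernLoop (n ones : Int) : Int :=
  if 0 < n then kernLoop (PySem.Int.band n (n - 1)) (ones + 1) else ones
termination_by n.toNat
decreasing_by
  rename_i h
  obtain ⟨a, rfl⟩ : ∃ a : Nat, n = (a : Int) := ⟨n.toNat, by omega⟩
  rw [show (a : Int) - 1 = ((a - 1 : Nat) : Int) by omega, PySem.Int.band_natCast]
  have := Nat.and_le_right (n := a) (m := a - 1)
  omega

def max_min_binary_alt (num : Int) : Int × Int :=
  let ones := kernLoop num 0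
  let min_bin := (1 <<< ones.toNat) - 1
  let max_bin := min_bin <<< (16 - ones).toNat
  (min_bin, max_bin)

-- ===== PRECONDITION & SPEC =====
-- Pre_ excludes positive num with more than 16 set bits: there Python A (and Python B alike)
-- raises ValueError ("negative shift count") in `min_bin << (16 - ones)`.
def Pre_max_min_binary (num : Int) : Prop := 0 < num → PySem.Int.bitCount num ≤ 16
instance (num : Int) : Decidable (Pre_max_min_binary num) := by unfold Pre_max_min_binary; infer_instance
def pvWitness_max_min_binary : Int := 6

def Spec_max_min_binary (num : Int) (out : Int × Int) : Prop := out = max_min_binary_alt num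
instance (num : Int) (out : Int × Int) : Decidable (Spec_max_min_binary num out) := by unfold Spec_max_min_binary; infer_instance

-- ===== CLAIM (what is proved, stated in full; the proofs are below) =====
def Claim_equal_max_min_binary : Prop := ∀ (num : Int), Dom_max_min_binary num → Pre_max_min_binary num → Spec_max_min_binary num (max_min_binary num)

-- ===== LEMMAS AND PROOFS =====

-- bit count of a natural number, through PySem's Python-exact `bit_count`
def bc (n : Nat) : Nat := PySem.Int.bitCount (n : Int)

theorem bc_zero : bc 0 = 0 := by decide

theorem bc_half (m : Nat) (h : 0 < m) : bc m = m % 2 + bc (m / 2) :=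
  PySem.Int.bitCount_natCast h

theorem bc_double (m : Nat) : bc (2 * m) = bc m := by
  rcases Nat.eq_zero_or_pos m with rfl | h
  · rfl
  · rw [bc_half (2 * m) (by omega)]
    have h1 : 2 * m % 2 = 0 := by omega
    have h2 : 2 * m / 2 = m := by omega
    rw [h1, h2]; omega

theorem land_odd_pred (m : Nat) : (2 * m + 1) &&& (2 * m) = 2 * m := by
  have h1 : 2 * m + 1 = Nat.bit true m := by simp [Nat.bit]
  have h2 : 2 * m = Nat.bit false m := by simp [Nat.bit]
  rw [h1]; conv_lhs => rw [h2]
  conv_rhs => rw [h2]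
  show Nat.land _ _ = _
  rw [Nat.land, Nat.bitwise_bit]
  simp [Nat.bit]
  exact Nat.and_self m

theorem land_even_pred (m : Nat) (h : 0 < m) :
    (2 * m) &&& (2 * m - 1) = 2 * (m &&& (m - 1)) := by
  have h2 : 2 * m - 1 = Nat.bit true (m - 1) := by simp [Nat.bit]; omega
  have h1 : 2 * m = Nat.bit false m := by simp [Nat.bit]
  rw [h2]; conv_lhs => rw [h1]
  show Nat.land _ _ = _
  rw [Nat.land, Nat.bitwise_bit]
  simp [Nat.bit]
  rfl

-- Kernighan's identity: clearing the lowest set bit drops the bit count by one.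
theorem bc_land_pred (a : Nat) (ha : 0 < a) : bc (a &&& (a - 1)) + 1 = bc a := by
  induction a using Nat.strong_induction_on with
  | _ a ih =>
    rcases Nat.even_or_odd a with ⟨m, hm⟩ | ⟨m, hm⟩
    · -- a = 2*m, m > 0
      have hm2 : a = 2 * m := by omega
      have hm' : 0 < m := by omega
      subst hm2
      rw [show 2 * m - 1 = 2 * m - 1 from rfl, land_even_pred m hm', bc_double,
          ih m (by omega) hm', bc_half (2 * m) (by omega)]
      have h1 : 2 * m % 2 = 0 := by omega
      have h2 : 2 * m / 2 = m := by omega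
      rw [h1, h2]; omega
    · -- a = 2*m+1
      subst hm
      rw [show 2 * m + 1 - 1 = 2 * m by omega, land_odd_pred, bc_double,
          bc_half (2 * m + 1) (by omega)]
      have h1 : (2 * m + 1) % 2 = 1 := by omega
      have h2 : (2 * m + 1) / 2 = m := by omega
      rw [h1, h2]; omega

theorem kernLoop_eq (t : Nat) : ∀ (n ones : Int), n.toNat = t →
    kernLoop n ones = ones + bc n.toNat := by
  induction t using Nat.strong_induction_on with
  | _ t ih =>
    intro n ones hnt
    rw [kernLoop]
    by_cases h : 0 < n
    · rw [if_pos h]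
      obtain ⟨a, rfl⟩ : ∃ a : Nat, n = (a : Int) := ⟨n.toNat, by omega⟩
      have ha : 0 < a := by exact_mod_cast h
      rw [show (a : Int) - 1 = ((a - 1 : Nat) : Int) by omega, PySem.Int.band_natCast]
      have hlt : (a &&& (a - 1)) < a :=
        lt_of_le_of_lt (Nat.and_le_right) (by omega)
      rw [ih (a &&& (a - 1)) (by simp at hnt; omega) _ (ones + 1) (by simp)]
      have := bc_land_pred a ha
      simp only [Int.toNat_natCast]
      omega
    · rw [if_neg h]
      have h0 : n.toNat = 0 := by omega
      rw [h0, bc_zero]; omega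

theorem maxMinLoopA_eq (t : Nat) : ∀ (num mask ones : Int) (k : Nat) (hm : 0 < mask),
    mask = 2 ^ k → num.toNat / 2 ^ k = t →
    maxMinLoopA num mask ones hm = ones + bc t := by
  induction t using Nat.strong_induction_on with
  | _ t ih =>
    intro num mask ones k hm hmask ht
    rw [maxMinLoopA]
    by_cases hcond : mask ≤ num
    · rw [if_pos hcond]
      have hnum0 : 0 ≤ num := le_trans (le_of_lt hm) hcond
      obtain ⟨a, rfl⟩ : ∃ a : Nat, num = (a : Int) := ⟨num.toNat, by omega⟩
      have hcast : ((2 ^ k : Nat) : Int) = mask := by rw [hmask]; push_cast; ring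
      have hak : 2 ^ k ≤ a := by
        have := hcond; rw [← hcast] at this; exact_mod_cast this
      have ht' : a / 2 ^ k = t := by simpa using ht
      have htpos : 0 < t := ht' ▸ Nat.div_pos hak (by positivity)
      -- the bit test: num & mask > 0 ↔ t % 2 = 1
      have hbit : (PySem.Int.band (a : Int) mask > 0) ↔ t % 2 = 1 := by
        rw [← hcast, PySem.Int.band_natCast, Nat.and_two_pow,
            Nat.testBit_eq_decide_div_mod_eq, ht']
        rcases Nat.mod_two_eq_zero_or_one t with h2 | h2 <;> simp [h2]
      have hrec : (a : Int).toNat / 2 ^ (k + 1) = t / 2 := by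
        simp only [Int.toNat_natCast]
        rw [pow_succ, ← Nat.div_div_eq_div_mul, ht']
      rw [ih (t / 2) (Nat.div_lt_self htpos (by norm_num)) (a : Int) (mask * 2) _ (k + 1)
          (by omega) (by rw [hmask]; ring) hrec]
      rw [bc_half t htpos]
      by_cases hb : (PySem.Int.band (a : Int) mask > 0)
      · rw [if_pos hb]
        have := hbit.mp hb
        omega
      · rw [if_neg hb]
        have : t % 2 = 0 := by
          rcases Nat.mod_two_eq_zero_or_one t with h2 | h2
          · exact h2
          · exact absurd (hbit.mpr h2) hb
        omega
    · rw [if_neg hcond]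
      have ht0 : t = 0 := by
        subst ht
        by_cases h : num ≤ 0
        · have : num.toNat = 0 := by omega
          simp [this]
        · have hx : num.toNat < 2 ^ k := by
            have h1 : num < mask := lt_of_not_ge hcond
            have h2 : ((2 ^ k : Nat) : Int) = mask := by rw [hmask]; push_cast; ring
            omega
          exact Nat.div_eq_of_lt hx
      rw [ht0, bc_zero]; omega

theorem loops_agree (num : Int) (hm : (0:Int) < 1) :
    maxMinLoopA num 1 0 hm = kernLoop num 0 := by
  rw [maxMinLoopA_eq (num.toNat) num 1 0 0 hm (by norm_num) (by simp),
      kernLoop_eq (num.toNat) num 0 rfl]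

-- ===== VERDICT (by name: the statement is the Claim_ definition above) =====
theorem max_min_binary_spec : Claim_equal_max_min_binary := by
  intro num _ _
  unfold Spec_max_min_binary max_min_binary max_min_binary_alt
  rw [loops_agree]
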